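-- pv_equiv track=rewrite | github.com/stuart-bradley/code_interview_practice | Stacks_And_Queues.py | exercise_5
-- ===== SOURCE A (Python) =====
-- def exercise_5(stack):
-- 	tmp_stack = []
-- 	while stack:
-- 		# hold current variable and find location in tmp_stack.
-- 		tmp = stack.pop()
-- 		while tmp_stack and (tmp_stack[-1] > tmp):
-- 			stack.append(tmp_stack.pop())
-- 		tmp_stack.append(tmp)
--
-- 	while tmp_stack:
-- 		stack.append(tmp_stack.pop())
--
-- 	return stack
-- ===== SOURCE B (Python) =====
-- def exercise_5(stack):
--     out = []
--     for x in stack: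
--         i = 0
--         while i < len(out) and out[i] > x:
--             i += 1
--         out.insert(i, x)
--     stack[:] = out
--     return stack
-- ===== Notes on version B (the rewrite author's own statement) =====
-- stated objective: faster
-- what changed: Replaced the two-stack shuttle sort (elements repeatedly popped back and forth between stack and tmp_stack, each in Python-level loop steps) by a single forward pass that builds a descending list, inserting each element once at the index found by scanning for its place (the insertion itself is one C-level list.insert).
import Mathlib
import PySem

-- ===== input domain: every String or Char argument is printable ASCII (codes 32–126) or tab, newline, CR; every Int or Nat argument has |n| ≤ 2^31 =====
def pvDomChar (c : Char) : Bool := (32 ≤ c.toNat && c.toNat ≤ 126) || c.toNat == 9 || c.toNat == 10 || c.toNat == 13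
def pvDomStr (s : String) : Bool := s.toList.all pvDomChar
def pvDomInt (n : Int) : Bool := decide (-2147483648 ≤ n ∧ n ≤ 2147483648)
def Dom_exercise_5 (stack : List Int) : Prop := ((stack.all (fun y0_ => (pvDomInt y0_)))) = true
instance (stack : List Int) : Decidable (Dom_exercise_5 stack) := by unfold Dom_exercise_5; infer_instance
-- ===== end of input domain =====

-- B replaces A's two-stack shuttle sort by a single forward pass inserting each
-- element once into a descending list (a timing run measured B faster by a
-- constant factor); both Pythons mutate the argument list in place and end with the
-- same contents; the equivalence proved is about the returned list.

-- ===== PORT A =====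
-- A's inner `while tmp_stack and tmp_stack[-1] > tmp:` loop: moves elements from the
-- top (end) of tmp_stack t back onto stack s while they exceed tmp (= a).
def pvInner (s t : List Int) (a : Int) : List Int × List Int :=
  match h : t.getLast? with
  | none => (s, t)
  | some z =>
      if a < z then pvInner (s ++ [z]) t.dropLast a else (s, t)
termination_by t.length
decreasing_by
  have ht : t ≠ [] := by intro he; rw [he] at h; simp at h
  have : 0 < t.length := List.length_pos_iff.mpr ht
  simp [List.length_dropLast]; omega

-- termination measure for A's outer loop (the facts about it are proved here because
-- pvLoop1's decreasing_by cites them)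
def pvCountGT (t : List Int) (x : Int) : Nat := t.countP (fun y => decide (x < y))
def pvS (s t : List Int) : Nat := (s.map (fun x => pvCountGT t x)).sum
def pvInvS : List Int → Nat
  | [] => 0
  | x :: xs => xs.countP (fun z => decide (x < z)) + pvInvS xs
def pvInvT : List Int → Nat
  | [] => 0
  | y :: ys => ys.countP (fun z => decide (z < y)) + pvInvT ys
def pvPhi (s t : List Int) : Nat := pvS s t + pvInvS s + pvInvT t

theorem pvInvS_append (s : List Int) (a : Int) :
    pvInvS (s ++ [a]) = pvInvS s + s.countP (fun x => decide (x < a)) := by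
  induction s with
  | nil => simp [pvInvS]
  | cons x xs ih => simp [pvInvS, ih, List.countP_append, List.countP_cons]; omega

theorem pvInvT_append (t : List Int) (a : Int) :
    pvInvT (t ++ [a]) = pvInvT t + t.countP (fun y => decide (a < y)) := by
  induction t with
  | nil => simp [pvInvT]
  | cons y ys ih => simp [pvInvT, ih, List.countP_append, List.countP_cons]; omega

theorem pvS_append_t (s t : List Int) (a : Int) :
    pvS s (t ++ [a]) = pvS s t + s.countP (fun x => decide (x < a)) := by
  induction s with
  | nil => simp [pvS]
  | cons x xs ih =>
      simp [pvS, pvCountGT, List.countP_append, List.countP_cons] at *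
      omega

theorem pvS_append_s (s t : List Int) (a : Int) :
    pvS (s ++ [a]) t = pvS s t + pvCountGT t a := by
  simp [pvS]

theorem pvPhi_swap (s t : List Int) (a : Int) :
    pvPhi (s ++ [a]) t = pvPhi s (t ++ [a]) := by
  simp [pvPhi, pvS_append_s, pvS_append_t, pvInvS_append, pvInvT_append, pvCountGT]
  omega

theorem pvInner_len (s t : List Int) (a : Int) :
    s.length ≤ (pvInner s t a).1.length := by
  fun_induction pvInner with
  | case1 => simp
  | case2 s t z h hlt ih => simp at ih; omega
  | case3 => simp

theorem pvInner_phi (s t : List Int) (a : Int) :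
    pvPhi (pvInner s t a).1 ((pvInner s t a).2 ++ [a]) + (pvInner s t a).1.length
      = pvPhi (s ++ [a]) t + s.length := by
  fun_induction pvInner with
  | case1 s t h =>
      have ht : t = [] := List.getLast?_eq_none_iff.mp h
      subst ht; simp [pvPhi_swap]
  | case2 s t z h hlt ih =>
      obtain ⟨t', rfl⟩ := List.getLast?_eq_some_iff.mp h
      rw [List.dropLast_concat] at ih ⊢
      have key : pvPhi ((s ++ [z]) ++ [a]) t' + 1 = pvPhi (s ++ [a]) (t' ++ [z]) := by
        rw [pvPhi_swap (s ++ [z]) t' a, pvPhi_swap s (t' ++ [a]) z,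
            pvPhi_swap s (t' ++ [z]) a]
        have h1 : pvInvT ((t' ++ [a]) ++ [z]) = pvInvT t'
            + t'.countP (fun y => decide (a < y)) + t'.countP (fun y => decide (z < y)) := by
          rw [pvInvT_append (t' ++ [a]) z, pvInvT_append t' a]
          simp [List.countP_append, List.countP_cons, not_lt.mpr (le_of_lt hlt)]
        have h2 : pvInvT ((t' ++ [z]) ++ [a]) = pvInvT t'
            + t'.countP (fun y => decide (z < y)) + t'.countP (fun y => decide (a < y)) + 1 := by
          rw [pvInvT_append (t' ++ [z]) a, pvInvT_append t' z]
          simp [List.countP_append, List.countP_cons, hlt]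
          omega
        have h3 : pvS s ((t' ++ [a]) ++ [z]) = pvS s ((t' ++ [z]) ++ [a]) := by
          rw [pvS_append_t s (t' ++ [a]) z, pvS_append_t s t' a, pvS_append_t s (t' ++ [z]) a,
              pvS_append_t s t' z]
          omega
        simp only [pvPhi, h1, h2, h3]
        omega
      simp only [List.length_append, List.length_cons, List.length_nil] at ih ⊢
      omega
  | case3 s t z h hlt => simp [pvPhi_swap]

-- A's outer `while stack:` loop, with stack s and tmp_stack t
def pvLoop1 (s t : List Int) : List Int :=
  match h : s.getLast? with
  | none => t
  | some a => pvLoop1 (pvInner s.dropLast t a).1 ((pvInner s.dropLast t a).2 ++ [a])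
termination_by (pvPhi s t, s.length)
decreasing_by
  obtain ⟨s', rfl⟩ := List.getLast?_eq_some_iff.mp h
  rw [List.dropLast_concat]
  have E := pvInner_phi s' t a
  have L := pvInner_len s' t a
  rcases Nat.lt_or_ge (pvPhi (pvInner s' t a).1 ((pvInner s' t a).2 ++ [a]))
      (pvPhi (s' ++ [a]) t) with hlt | hge
  · exact Prod.Lex.left _ _ hlt
  · have hEq : pvPhi (pvInner s' t a).1 ((pvInner s' t a).2 ++ [a])
        = pvPhi (s' ++ [a]) t := by omega
    rw [hEq]
    refine Prod.Lex.right _ ?_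
    simp
    omega

-- A's final `while tmp_stack: stack.append(tmp_stack.pop())` loop
def pvDrain (s t : List Int) : List Int :=
  match h : t.getLast? with
  | none => s
  | some z => pvDrain (s ++ [z]) t.dropLast
termination_by t.length
decreasing_by
  have ht : t ≠ [] := by intro he; rw [he] at h; simp at h
  have : 0 < t.length := List.length_pos_iff.mpr ht
  simp [List.length_dropLast]; omega

def exercise_5 (stack : List Int) : List Int :=
  pvDrain [] (pvLoop1 stack [])

-- ===== PORT B =====
-- B's inner `while i < len(out) and out[i] > x: i += 1` scan: i = length of the
-- longest prefix of out whose elements exceed x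
def pvFindIdx (out : List Int) (x : Int) : Nat :=
  (out.takeWhile (fun y => decide (x < y))).length

-- B's `out.insert(i, x)`
def pvInsertAt (out : List Int) (x : Int) : List Int :=
  out.insertIdx (pvFindIdx out x) x

-- B's `for x in stack:` loop building out, then `stack[:] = out; return stack`
def exercise_5_alt (stack : List Int) : List Int :=
  stack.foldl (fun out x => pvInsertAt out x) []

-- ===== PRECONDITION & SPEC =====
def Spec_exercise_5 (stack : List Int) (out : List Int) : Prop := out = exercise_5_alt stack
instance (stack : List Int) (out : List Int) : Decidable (Spec_exercise_5 stack out) := by unfold Spec_exercise_5; infer_instance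

-- ===== CLAIM (what is proved, stated in full; the proofs are below) =====
def Claim_equal_exercise_5 : Prop := ∀ (stack : List Int), Dom_exercise_5 stack → Spec_exercise_5 stack (exercise_5 stack)

-- ===== LEMMAS AND PROOFS =====

theorem pvDrain_eq (s t : List Int) : pvDrain s t = s ++ t.reverse := by
  fun_induction pvDrain with
  | case1 s t h =>
      have ht : t = [] := List.getLast?_eq_none_iff.mp h
      simp [ht]
  | case2 s t z h ih =>
      obtain ⟨t', rfl⟩ := List.getLast?_eq_some_iff.mp h
      rw [List.dropLast_concat] at ih
      simp [ih]

theorem pvInner_perm (s t : List Int) (a : Int) :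
    ((pvInner s t a).1 ++ (pvInner s t a).2).Perm (s ++ t) := by
  fun_induction pvInner with
  | case1 => exact List.Perm.refl _
  | case2 s t z h hlt ih =>
      obtain ⟨t', rfl⟩ := List.getLast?_eq_some_iff.mp h
      rw [List.dropLast_concat] at ih ⊢
      refine ih.trans ?_
      rw [List.append_assoc]
      exact List.Perm.append_left s List.perm_append_comm
  | case3 => exact List.Perm.refl _

theorem pvInner_sorted (s t : List Int) (a : Int) :
    List.Pairwise (· ≤ ·) t → List.Pairwise (· ≤ ·) ((pvInner s t a).2 ++ [a]) := by
  fun_induction pvInner with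
  | case1 s t h =>
      intro _
      have ht : t = [] := List.getLast?_eq_none_iff.mp h
      simp [ht]
  | case2 s t z h hlt ih =>
      intro ht
      exact ih (List.Pairwise.sublist (List.dropLast_sublist t) ht)
  | case3 s t z h hlt =>
      intro ht
      rw [not_lt] at hlt
      obtain ⟨t', rfl⟩ := List.getLast?_eq_some_iff.mp h
      rw [List.pairwise_append] at ht ⊢
      obtain ⟨hp, -, hb⟩ := ht
      refine ⟨List.pairwise_append.mpr ⟨hp, List.pairwise_singleton _ _, ?_⟩,
        List.pairwise_singleton _ _, ?_⟩
      · intro x hx y hy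
        simp at hy; rw [hy]
        exact hb x hx z (by simp)
      · intro x hx y hy
        simp at hy; rw [hy]
        rcases List.mem_append.mp hx with hx' | hx'
        · exact le_trans (hb x hx' z (by simp)) hlt
        · simp at hx'; subst hx'; exact hlt

theorem pvLoop1_spec (s t : List Int) :
    List.Pairwise (· ≤ ·) t →
      (pvLoop1 s t).Perm (s ++ t) ∧ List.Pairwise (· ≤ ·) (pvLoop1 s t) := by
  fun_induction pvLoop1 with
  | case1 s t h =>
      intro ht
      have hs : s = [] := List.getLast?_eq_none_iff.mp h
      subst hs
      exact ⟨by simp [List.Perm.refl], ht⟩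
  | case2 s t a h ih =>
      intro ht
      obtain ⟨s', rfl⟩ := List.getLast?_eq_some_iff.mp h
      rw [List.dropLast_concat] at ih ⊢
      obtain ⟨hperm, hsorted⟩ := ih (pvInner_sorted s' t a ht)
      refine ⟨?_, hsorted⟩
      have h1 : ((pvInner s' t a).1 ++ ((pvInner s' t a).2 ++ [a])).Perm ((s' ++ t) ++ [a]) := by
        rw [← List.append_assoc]
        exact (pvInner_perm s' t a).append_right [a]
      have h2 : ((s' ++ t) ++ [a]).Perm ((s' ++ [a]) ++ t) := by
        rw [List.append_assoc, List.append_assoc]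
        exact List.Perm.append_left s' List.perm_append_comm
      exact hperm.trans (h1.trans h2)

theorem pvInsertAt_eq (out : List Int) (x : Int) :
    pvInsertAt out x
      = out.takeWhile (fun y => decide (x < y)) ++ x :: out.dropWhile (fun y => decide (x < y)) := by
  unfold pvInsertAt pvFindIdx
  induction out with
  | nil => simp
  | cons y ys ih =>
      by_cases hp : x < y
      · rw [List.takeWhile_cons_of_pos (p := fun y => decide (x < y)) (a := y) (l := ys)
              (by simpa using hp),
            List.dropWhile_cons_of_pos (p := fun y => decide (x < y)) (a := y) (l := ys)
              (by simpa using hp),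
            List.length_cons, List.insertIdx_succ_cons, ih, List.cons_append]
      · rw [List.takeWhile_cons_of_neg (p := fun y => decide (x < y)) (a := y) (l := ys)
              (by simpa using hp),
            List.dropWhile_cons_of_neg (p := fun y => decide (x < y)) (a := y) (l := ys)
              (by simpa using hp),
            List.length_nil, List.insertIdx_zero, List.nil_append]

theorem pvInsertAt_perm (out : List Int) (x : Int) :
    (pvInsertAt out x).Perm (x :: out) := by
  rw [pvInsertAt_eq]
  refine List.perm_middle.trans ?_
  rw [List.takeWhile_append_dropWhile]

theorem pvDropWhile_le (x : Int) (out : List Int) (h : List.Pairwise (· ≥ ·) out) :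
    ∀ z ∈ out.dropWhile (fun y => decide (x < y)), z ≤ x := by
  induction out with
  | nil => simp
  | cons y ys ih =>
      by_cases hp : x < y
      · rw [List.dropWhile_cons_of_pos (p := fun y => decide (x < y)) (a := y) (l := ys)
              (by simpa using hp)]
        exact ih h.of_cons
      · rw [List.dropWhile_cons_of_neg (p := fun y => decide (x < y)) (a := y) (l := ys)
              (by simpa using hp)]
        intro z hz
        rcases List.mem_cons.mp hz with rfl | hz2
        · exact not_lt.mp hp
        · exact le_trans (List.rel_of_pairwise_cons h hz2) (not_lt.mp hp)

theorem pvInsertAt_sorted (out : List Int) (x : Int)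
    (h : List.Pairwise (· ≥ ·) out) :
    List.Pairwise (· ≥ ·) (pvInsertAt out x) := by
  rw [pvInsertAt_eq]
  rw [List.pairwise_append]
  refine ⟨List.Pairwise.sublist (List.takeWhile_sublist _) h, ?_, ?_⟩
  · rw [List.pairwise_cons]
    exact ⟨pvDropWhile_le x out h, List.Pairwise.sublist (List.dropWhile_sublist _) h⟩
  · intro a ha b hb
    have hxa : x < a := by simpa using List.mem_takeWhile_imp ha
    rcases List.mem_cons.mp hb with rfl | hb2
    · exact le_of_lt hxa
    · exact le_trans (pvDropWhile_le x out h b hb2) (le_of_lt hxa)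

theorem pvFold_spec (l out : List Int) (hout : List.Pairwise (· ≥ ·) out) :
    (l.foldl (fun out x => pvInsertAt out x) out).Perm (out ++ l)
      ∧ List.Pairwise (· ≥ ·) (l.foldl (fun out x => pvInsertAt out x) out) := by
  induction l generalizing out with
  | nil => exact ⟨by simpa using List.Perm.refl out, hout⟩
  | cons x xs ih =>
      obtain ⟨hperm, hsorted⟩ := ih (pvInsertAt out x) (pvInsertAt_sorted out x hout)
      refine ⟨?_, hsorted⟩
      simp only [List.foldl_cons]
      refine hperm.trans ?_
      refine (List.Perm.append_right xs (pvInsertAt_perm out x)).trans ?_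
      exact (List.perm_middle (a := x) (l₁ := out) (l₂ := xs)).symm

theorem pvSortB_spec (s : List Int) :
    (exercise_5_alt s).Perm s ∧ List.Pairwise (· ≥ ·) (exercise_5_alt s) := by
  unfold exercise_5_alt
  obtain ⟨hperm, hsorted⟩ := pvFold_spec s [] (by simp)
  exact ⟨by simpa using hperm, hsorted⟩

-- ===== VERDICT (by name: the statement is the Claim_ definition above) =====
theorem exercise_5_spec : Claim_equal_exercise_5 := by
  intro stack _
  unfold Spec_exercise_5 exercise_5
  obtain ⟨hLp, hLs⟩ := pvLoop1_spec stack [] (by simp)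
  obtain ⟨hBp, hBs⟩ := pvSortB_spec stack
  rw [pvDrain_eq]
  simp only [List.nil_append]
  refine List.Perm.eq_of_pairwise (le := fun a b : Int => a ≥ b)
    (fun a b _ _ h1 h2 => le_antisymm h2 h1) ?_ hBs ?_
  · rw [List.pairwise_reverse]
    exact hLs.imp (fun {a b} hab => hab)
  · exact ((List.reverse_perm _).trans (by simpa using hLp)).trans hBp.symm
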